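-- pv_equiv track=rewrite | github.com/tiammomo/moyuan-shop | probe_openai_proxy.py | choose_chat_model
-- ===== SOURCE A (Python) =====
-- PREFERRED_CHAT_MODELS = [
--     "gpt-5.4-mini",
--     "gpt-5.4",
--     "gpt-5.2",
--     "gpt-5.5",
-- ]
--
-- def choose_chat_model(model_ids: list[str], requested: str | None) -> str | None:
--     if requested:
--         return requested
--     for model in PREFERRED_CHAT_MODELS:
--         if model in model_ids:
--             return model
--     for model in model_ids:
--         if model.startswith("gpt-") and not model.startswith("gpt-image-"):
--             return model
--     return None
-- ===== SOURCE B (Python) =====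
-- PREFERRED_CHAT_MODELS = [
--     "gpt-5.4-mini",
--     "gpt-5.4",
--     "gpt-5.2",
--     "gpt-5.5",
-- ]
--
-- def choose_chat_model(model_ids: list[str], requested: str | None) -> str | None:
--     if requested:
--         return requested
--     rank = {m: i for i, m in enumerate(PREFERRED_CHAT_MODELS)}
--     best = None
--     best_rank = len(PREFERRED_CHAT_MODELS)
--     for m in model_ids:
--         r = rank.get(m)
--         if r is not None and r < best_rank:
--             best = m
--             best_rank = r
--     if best is not None:
--         return best
--     for m in model_ids:
--         if m.startswith("gpt-") and not m.startswith("gpt-image-"):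
--             return m
--     return None
-- ===== Notes on version B (the rewrite author's own statement) =====
-- stated objective: alternative
-- what changed: The preference loop (iterate PREFERRED_CHAT_MODELS, membership-test each against model_ids) is replaced by a rank table over PREFERRED_CHAT_MODELS and a single argmin pass over model_ids keeping the model with the smallest rank.
import Mathlib
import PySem

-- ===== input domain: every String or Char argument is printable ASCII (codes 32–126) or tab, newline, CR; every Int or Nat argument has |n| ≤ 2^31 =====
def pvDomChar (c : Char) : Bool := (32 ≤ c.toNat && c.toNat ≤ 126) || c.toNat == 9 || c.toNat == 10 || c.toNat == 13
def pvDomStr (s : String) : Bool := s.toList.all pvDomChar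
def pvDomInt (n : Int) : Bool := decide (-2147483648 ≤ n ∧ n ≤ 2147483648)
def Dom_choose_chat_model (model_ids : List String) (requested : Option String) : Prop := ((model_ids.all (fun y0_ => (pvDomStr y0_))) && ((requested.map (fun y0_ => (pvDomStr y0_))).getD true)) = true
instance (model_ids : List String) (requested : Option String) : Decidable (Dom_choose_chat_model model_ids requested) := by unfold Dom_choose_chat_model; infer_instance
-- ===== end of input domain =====

-- B replaces the loop over PREFERRED_CHAT_MODELS (membership test per entry) by a rank
-- table and one argmin pass over model_ids; alternative decomposition, same cost class.

-- ===== PORT A =====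
def preferredChatModels : List String :=
  ["gpt-5.4-mini", "gpt-5.4", "gpt-5.2", "gpt-5.5"]

-- 'for model in PREFERRED_CHAT_MODELS: if model in model_ids: return model'
def prefScanA (model_ids : List String) : List String → Option String
  | [] => none
  | m :: rest => if model_ids.contains m then some m else prefScanA model_ids rest

-- 'for model in model_ids: if model.startswith("gpt-") and not …: return model'
def fallbackScanA : List String → Option String
  | [] => none
  | m :: rest =>
      if PySem.Str.startswith m "gpt-" && !(PySem.Str.startswith m "gpt-image-") then some m
      else fallbackScanA rest

def choose_chat_model (model_ids : List String) (requested : Option String) : Option String :=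
  if requested.getD "" ≠ "" then requested   -- 'if requested:' (truthy = some non-empty string)
  else match prefScanA model_ids preferredChatModels with
    | some m => some m
    | none => fallbackScanA model_ids

-- ===== PORT B =====
-- rank = {m: i for i, m in enumerate(PREFERRED_CHAT_MODELS)}
def prefRank : PySem.Dict String Int :=
  (PySem.List.enumerate preferredChatModels).foldl
    (fun d p => d.insert p.2 p.1) PySem.Dict.empty

-- body of B's argmin loop over model_ids
def bestStep (st : Option String × Int) (m : String) : Option String × Int :=
  match prefRank.get? m with
  | some r => if r < st.2 then (some m, r) else st
  | none => st

def fallbackScanB : List String → Option String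
  | [] => none
  | m :: rest =>
      if PySem.Str.startswith m "gpt-" && !(PySem.Str.startswith m "gpt-image-") then some m
      else fallbackScanB rest

def choose_chat_model_alt (model_ids : List String) (requested : Option String) : Option String :=
  if requested.getD "" ≠ "" then requested
  else
    let st := model_ids.foldl bestStep (none, (preferredChatModels.length : Int))
    match st.1 with
    | some b => some b
    | none => fallbackScanB model_ids

-- ===== PRECONDITION & SPEC =====
def Spec_choose_chat_model (model_ids : List String) (requested : Option String) (out : Option String) : Prop := out = choose_chat_model_alt model_ids requested
instance (model_ids : List String) (requested : Option String) (out : Option String) : Decidable (Spec_choose_chat_model model_ids requested out) := by unfold Spec_choose_chat_model; infer_instance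

-- ===== CLAIM (what is proved, stated in full; the proofs are below) =====
def Claim_equal_choose_chat_model : Prop := ∀ (model_ids : List String) (requested : Option String), Dom_choose_chat_model model_ids requested → Spec_choose_chat_model model_ids requested (choose_chat_model model_ids requested)

-- ===== LEMMAS AND PROOFS =====

theorem get?_prefRank (m : String) : prefRank.get? m =
    if m = "gpt-5.4-mini" then some 0
    else if m = "gpt-5.4" then some 1
    else if m = "gpt-5.2" then some 2
    else if m = "gpt-5.5" then some 3
    else none := by
  by_cases h0 : m = "gpt-5.4-mini"
  · subst h0; decide
  by_cases h1 : m = "gpt-5.4"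
  · subst h1; decide
  by_cases h2 : m = "gpt-5.2"
  · subst h2; decide
  by_cases h3 : m = "gpt-5.5"
  · subst h3; decide
  have h : prefRank = PySem.Dict.mk
      [("gpt-5.4-mini", 0), ("gpt-5.4", 1), ("gpt-5.2", 2), ("gpt-5.5", 3)] := by decide
  rw [h]
  have g0 : ("gpt-5.4-mini" == m) = false := beq_eq_false_iff_ne.mpr (fun h => h0 h.symm)
  have g1 : ("gpt-5.4" == m) = false := beq_eq_false_iff_ne.mpr (fun h => h1 h.symm)
  have g2 : ("gpt-5.2" == m) = false := beq_eq_false_iff_ne.mpr (fun h => h2 h.symm)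
  have g3 : ("gpt-5.5" == m) = false := beq_eq_false_iff_ne.mpr (fun h => h3 h.symm)
  simp [PySem.Dict.get?, List.find?, g0, g1, g2, g3, h0, h1, h2, h3]

theorem fold_spec (ids : List String) (b : Option String) (r : Int) :
    ids.foldl bestStep (b, r) =
      (if ids.contains "gpt-5.4-mini" = true ∧ 0 < r then (some "gpt-5.4-mini", 0)
       else if ids.contains "gpt-5.4" = true ∧ 1 < r then (some "gpt-5.4", 1)
       else if ids.contains "gpt-5.2" = true ∧ 2 < r then (some "gpt-5.2", 2)
       else if ids.contains "gpt-5.5" = true ∧ 3 < r then (some "gpt-5.5", 3)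
       else (b, r)) := by
  induction ids generalizing b r with
  | nil => simp
  | cons m rest ih =>
    simp only [List.foldl_cons]
    by_cases h0 : m = "gpt-5.4-mini"
    · subst h0
      rw [show bestStep (b, r) "gpt-5.4-mini"
            = if (0:Int) < r then (some "gpt-5.4-mini", 0) else (b, r) from by
          simp only [bestStep, show prefRank.get? "gpt-5.4-mini" = some 0 from by decide]]
      simp only [List.contains_cons, show ("gpt-5.4-mini" == "gpt-5.4-mini") = true from by decide,
        show ("gpt-5.4" == "gpt-5.4-mini") = false from by decide,
        show ("gpt-5.2" == "gpt-5.4-mini") = false from by decide,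
        show ("gpt-5.5" == "gpt-5.4-mini") = false from by decide,
        Bool.true_or, Bool.false_or]
      by_cases hrk : (0:Int) < r
      · rw [if_pos hrk, ih]
        simp [hrk]
      · rw [if_neg hrk, ih]
        simp [hrk, show ¬((1:Int) < r) from by omega, show ¬((2:Int) < r) from by omega, show ¬((3:Int) < r) from by omega]
    by_cases h1 : m = "gpt-5.4"
    · subst h1
      rw [show bestStep (b, r) "gpt-5.4"
            = if (1:Int) < r then (some "gpt-5.4", 1) else (b, r) from by
          simp only [bestStep, show prefRank.get? "gpt-5.4" = some 1 from by decide]]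
      simp only [List.contains_cons, show ("gpt-5.4" == "gpt-5.4") = true from by decide,
        show ("gpt-5.4-mini" == "gpt-5.4") = false from by decide,
        show ("gpt-5.2" == "gpt-5.4") = false from by decide,
        show ("gpt-5.5" == "gpt-5.4") = false from by decide,
        Bool.true_or, Bool.false_or]
      by_cases hrk : (1:Int) < r
      · rw [if_pos hrk, ih]
        simp [hrk, show ((0:Int) < r) from by omega]
      · rw [if_neg hrk, ih]
        simp [hrk, show ¬((2:Int) < r) from by omega, show ¬((3:Int) < r) from by omega]
    by_cases h2 : m = "gpt-5.2"
    · subst h2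
      rw [show bestStep (b, r) "gpt-5.2"
            = if (2:Int) < r then (some "gpt-5.2", 2) else (b, r) from by
          simp only [bestStep, show prefRank.get? "gpt-5.2" = some 2 from by decide]]
      simp only [List.contains_cons, show ("gpt-5.2" == "gpt-5.2") = true from by decide,
        show ("gpt-5.4-mini" == "gpt-5.2") = false from by decide,
        show ("gpt-5.4" == "gpt-5.2") = false from by decide,
        show ("gpt-5.5" == "gpt-5.2") = false from by decide,
        Bool.true_or, Bool.false_or]
      by_cases hrk : (2:Int) < r
      · rw [if_pos hrk, ih]
        simp [hrk, show ((0:Int) < r) from by omega, show ((1:Int) < r) from by omega]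
      · rw [if_neg hrk, ih]
        simp [hrk, show ¬((3:Int) < r) from by omega]
    by_cases h3 : m = "gpt-5.5"
    · subst h3
      rw [show bestStep (b, r) "gpt-5.5"
            = if (3:Int) < r then (some "gpt-5.5", 3) else (b, r) from by
          simp only [bestStep, show prefRank.get? "gpt-5.5" = some 3 from by decide]]
      simp only [List.contains_cons, show ("gpt-5.5" == "gpt-5.5") = true from by decide,
        show ("gpt-5.4-mini" == "gpt-5.5") = false from by decide,
        show ("gpt-5.4" == "gpt-5.5") = false from by decide,
        show ("gpt-5.2" == "gpt-5.5") = false from by decide,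
        Bool.true_or, Bool.false_or]
      by_cases hrk : (3:Int) < r
      · rw [if_pos hrk, ih]
        simp [hrk, show ((0:Int) < r) from by omega, show ((1:Int) < r) from by omega, show ((2:Int) < r) from by omega]
      · rw [if_neg hrk, ih]
        simp [hrk]
    · rw [show bestStep (b, r) m = (b, r) from by
        simp only [bestStep, get?_prefRank, if_neg h0, if_neg h1, if_neg h2, if_neg h3]]
      simp only [List.contains_cons,
        beq_eq_false_iff_ne.mpr (fun h => h0 h.symm),
        beq_eq_false_iff_ne.mpr (fun h => h1 h.symm),
        beq_eq_false_iff_ne.mpr (fun h => h2 h.symm),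
        beq_eq_false_iff_ne.mpr (fun h => h3 h.symm), Bool.false_or]
      exact ih b r

theorem fallback_eq (ids : List String) : fallbackScanA ids = fallbackScanB ids := by
  induction ids with
  | nil => rfl
  | cons m rest ih => simp [fallbackScanA, fallbackScanB, ih]

-- ===== VERDICT (by name: the statement is the Claim_ definition above) =====
theorem choose_chat_model_spec : Claim_equal_choose_chat_model := by
  intro ids req _
  unfold Spec_choose_chat_model choose_chat_model choose_chat_model_alt
  by_cases hreq : req.getD "" ≠ ""
  · simp [hreq]
  · simp only [hreq, if_false]
    rw [fold_spec]
    simp only [preferredChatModels, prefScanA, List.length_cons, List.length_nil]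
    by_cases c0 : ids.contains "gpt-5.4-mini" = true <;>
      by_cases c1 : ids.contains "gpt-5.4" = true <;>
      by_cases c2 : ids.contains "gpt-5.2" = true <;>
      by_cases c3 : ids.contains "gpt-5.5" = true <;>
      simp_all [fallback_eq]
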